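-- pv_equiv track=rewrite | github.com/yyyyCode/EffiSkel | data/extract/SSS.py | filter_code
-- ===== SOURCE A (Python) =====
-- def filter_code(code, valid_tokens):
--     filtered_code = []
--
--     for line in code.split('\n'):
--         new_line = []
--         token = ''
--
--         for char in line:
--             if char.isalnum() or char in "_":
--                 token += char
--             else:
--                 if token:
--                     if token in valid_tokens:
--                         new_line.append(token)
--                     else:
--                         new_line.append('<MASK>')
--                     token = ''
--                 new_line.append(char)
--
--         if token:
--             if token in valid_tokens:
--                 new_line.append(token)
--             else:
--                 new_line.append(' ' * len(token))
--
--         filtered_code.append(''.join(new_line))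
--
--     return '\n'.join(filtered_code)
-- ===== SOURCE B (Python) =====
-- def filter_code(code, valid_tokens):
--     def is_word(c):
--         return c.isalnum() or c == '_'
--
--     def render_line(line):
--         parts = []
--         i, n = 0, len(line)
--         while i < n:
--             j = i + 1
--             if is_word(line[i]):
--                 while j < n and is_word(line[j]):
--                     j += 1
--                 tok = line[i:j]
--                 if tok in valid_tokens:
--                     parts.append(tok)
--                 elif j == n:
--                     parts.append(' ' * len(tok))
--                 else:
--                     parts.append('<MASK>')
--             else:
--                 while j < n and not is_word(line[j]):
--                     j += 1
--                 parts.append(line[i:j])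
--             i = j
--         return ''.join(parts)
--
--     return '\n'.join(render_line(line) for line in code.split('\n'))
-- ===== Notes on version B (the rewrite author's own statement) =====
-- stated objective: alternative
-- what changed: Replaces A's char-by-char accumulator (building each line as a list of pieces with pending-token state) with run-at-a-time scanning: each step consumes a maximal word or non-word run via index advancing (takeWhile/dropWhile in the port), deciding inline-mask vs trailing-spaces by whether the run ends the line.
import Mathlib
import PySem

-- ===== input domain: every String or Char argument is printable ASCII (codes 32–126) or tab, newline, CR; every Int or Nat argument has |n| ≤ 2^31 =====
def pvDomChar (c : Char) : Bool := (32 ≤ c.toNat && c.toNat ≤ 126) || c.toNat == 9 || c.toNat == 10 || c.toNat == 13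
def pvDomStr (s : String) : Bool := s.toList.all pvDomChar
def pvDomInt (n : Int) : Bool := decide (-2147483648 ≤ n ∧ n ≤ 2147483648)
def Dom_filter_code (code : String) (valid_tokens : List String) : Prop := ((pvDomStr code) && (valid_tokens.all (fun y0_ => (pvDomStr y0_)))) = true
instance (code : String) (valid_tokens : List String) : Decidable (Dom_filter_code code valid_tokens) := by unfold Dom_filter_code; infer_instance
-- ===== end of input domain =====

-- B replaces A's char-by-char accumulator with run-at-a-time scanning (maximal word / non-word
-- runs taken in one step); objective: alternative decomposition, equal value everywhere.

-- ===== PORT A =====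
-- char.isalnum() or char in "_"
def pvIsWord (c : Char) : Bool := PySem.Chars.isalnum c || c == '_'

-- one step of A's inner 'for char in line' loop; state = (new_line, token)
def pvAStep (valid_tokens : List String) (st : List (List Char) × List Char) (c : Char) :
    List (List Char) × List Char :=
  if pvIsWord c then (st.1, st.2 ++ [c])
  else
    let nl :=
      if st.2 ≠ [] then
        st.1 ++ [if valid_tokens.contains (String.mk st.2) then st.2 else "<MASK>".toList]
      else st.1
    (nl ++ [[c]], [])

-- A's per-line body: the loop, the trailing-token flush, ''.join(new_line)
def pvALine (valid_tokens : List String) (line : List Char) : List Char :=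
  let st := line.foldl (pvAStep valid_tokens) ([], [])
  let nl :=
    if st.2 ≠ [] then
      st.1 ++ [if valid_tokens.contains (String.mk st.2) then st.2
               else List.replicate st.2.length ' ']
    else st.1
  PySem.Chars.join [] nl

def filter_code (code : String) (valid_tokens : List String) : String :=
  let filtered_code := (PySem.Chars.splitOn code.toList ['\n']).foldl
    (fun acc line => acc ++ [pvALine valid_tokens line]) []
  String.mk (PySem.Chars.join ['\n'] filtered_code)

-- ===== PORT B =====
-- B's per-line scanner: consume one maximal run (word run or non-word run) per step
def pvBLine (valid_tokens : List String) : List Char → List Char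
  | [] => []
  | c :: cs =>
    if h : pvIsWord c = true then
      let tok := (c :: cs).takeWhile pvIsWord
      let rest := (c :: cs).dropWhile pvIsWord
      (if valid_tokens.contains (String.mk tok) then tok
       else if rest.isEmpty then List.replicate tok.length ' '
       else "<MASK>".toList) ++ pvBLine valid_tokens rest
    else
      let run := (c :: cs).takeWhile (fun d => !pvIsWord d)
      run ++ pvBLine valid_tokens ((c :: cs).dropWhile (fun d => !pvIsWord d))
  termination_by l => l.length
  decreasing_by
  · simp [h]
    exact cs.length_dropWhile_le _
  · simp [h]
    exact cs.length_dropWhile_le _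

def filter_code_alt (code : String) (valid_tokens : List String) : String :=
  String.mk (PySem.Chars.join ['\n']
    ((PySem.Chars.splitOn code.toList ['\n']).map (pvBLine valid_tokens)))

-- ===== PRECONDITION & SPEC =====
def Spec_filter_code (code : String) (valid_tokens : List String) (out : String) : Prop := out = filter_code_alt code valid_tokens
instance (code : String) (valid_tokens : List String) (out : String) : Decidable (Spec_filter_code code valid_tokens out) := by unfold Spec_filter_code; infer_instance

-- ===== CLAIM (what is proved, stated in full; the proofs are below) =====
def Claim_equal_filter_code : Prop := ∀ (code : String) (valid_tokens : List String), Dom_filter_code code valid_tokens → Spec_filter_code code valid_tokens (filter_code code valid_tokens)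

-- ===== LEMMAS AND PROOFS =====

theorem pvJoin_nil (l : List (List Char)) : PySem.Chars.join [] l = l.flatten := by
  induction l with
  | nil => rfl
  | cons a l ih =>
    cases l with
    | nil => simp [PySem.Chars.join, List.intercalate]
    | cons b t => simp_all [PySem.Chars.join, List.intercalate, List.intersperse]

-- a non-word head char peels off B's non-word run one char at a time
theorem pvBLine_nonword (valid_tokens : List String) (c : Char) (cs : List Char)
    (h : pvIsWord c = false) :
    pvBLine valid_tokens (c :: cs) = c :: pvBLine valid_tokens cs := by
  rw [pvBLine]
  simp only [h, Bool.false_eq_true, dite_false, List.takeWhile_cons, Bool.not_false, if_true,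
    List.dropWhile_cons]
  cases cs with
  | nil => simp [pvBLine]
  | cons d t =>
    by_cases hd : pvIsWord d
    · simp [hd]
    · simp only [List.cons_append]
      rw [pvBLine]
      simp [hd]

-- unfolding B's scanner on a word-head line
theorem pvBLine_word (valid_tokens : List String) (c : Char) (cs : List Char)
    (h : pvIsWord c = true) :
    pvBLine valid_tokens (c :: cs) =
      (if valid_tokens.contains (String.mk ((c :: cs).takeWhile pvIsWord)) then
        (c :: cs).takeWhile pvIsWord
       else if ((c :: cs).dropWhile pvIsWord).isEmpty then
        List.replicate ((c :: cs).takeWhile pvIsWord).length ' '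
       else "<MASK>".toList) ++ pvBLine valid_tokens ((c :: cs).dropWhile pvIsWord) := by
  rw [pvBLine]
  simp [h]

-- main loop invariant: finishing A's fold from state (acc, tok) with tok a word-char run
-- equals the joined acc followed by B's rendering of tok ++ cs
theorem pvMain (valid_tokens : List String) (cs : List Char) (acc : List (List Char))
    (tok : List Char) (hw : ∀ x ∈ tok, pvIsWord x = true) :
    (let st := cs.foldl (pvAStep valid_tokens) (acc, tok)
     let nl :=
       if st.2 ≠ [] then
         st.1 ++ [if valid_tokens.contains (String.mk st.2) then st.2
                  else List.replicate st.2.length ' ']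
       else st.1
     PySem.Chars.join [] nl) =
    PySem.Chars.join [] acc ++ pvBLine valid_tokens (tok ++ cs) := by
  induction cs generalizing acc tok with
  | nil =>
    simp only [List.foldl_nil, List.append_nil]
    cases tok with
    | nil => simp [pvBLine]
    | cons t ts =>
      rw [pvBLine_word valid_tokens t ts (hw t (by simp))]
      rw [show List.takeWhile pvIsWord (t :: ts) = t :: ts from
            List.takeWhile_eq_self_iff.mpr hw,
          show List.dropWhile pvIsWord (t :: ts) = [] from
            List.dropWhile_eq_nil_iff.mpr (fun x hx => hw x hx)]
      simp [pvJoin_nil, pvBLine]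
  | cons c cs ih =>
    rcases Bool.eq_false_or_eq_true (pvIsWord c) with hc | hc
    · -- word char: A extends the token
      have step : pvAStep valid_tokens (acc, tok) c = (acc, tok ++ [c]) := by
        simp [pvAStep, hc]
      rw [List.foldl_cons, step, ih acc (tok ++ [c])
        (by intro x hx; rcases List.mem_append.mp hx with h | h
            · exact hw x h
            · simp at h; simpa [h] using hc)]
      simp
    · -- non-word char: A flushes the token, B will peel runs
      have step : pvAStep valid_tokens (acc, tok) c =
          ((if tok ≠ [] then
              acc ++ [if valid_tokens.contains (String.mk tok) then tok else "<MASK>".toList]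
            else acc) ++ [[c]], []) := by
        simp [pvAStep, hc]
      rw [List.foldl_cons, step, ih _ [] (by simp)]
      cases tok with
      | nil =>
        rw [List.nil_append, List.nil_append, pvBLine_nonword valid_tokens c cs hc]
        simp [pvJoin_nil]
      | cons t ts =>
        rw [show ((t :: ts) ++ c :: cs) = t :: (ts ++ c :: cs) from rfl,
            pvBLine_word valid_tokens t (ts ++ c :: cs) (hw t (by simp)),
            show (t :: (ts ++ c :: cs)) = (t :: ts) ++ c :: cs from rfl,
            List.takeWhile_append_of_pos hw, List.dropWhile_append_of_pos hw]
        simp only [List.takeWhile_cons, hc, Bool.false_eq_true, ite_false, List.append_nil,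
          List.dropWhile_cons]
        rw [pvBLine_nonword valid_tokens c cs hc]
        simp [pvJoin_nil]

theorem pvLine_eq (valid_tokens : List String) (line : List Char) :
    pvALine valid_tokens line = pvBLine valid_tokens line := by
  have := pvMain valid_tokens line [] [] (by simp)
  simpa [pvALine, PySem.Chars.join, List.intercalate] using this

-- ===== VERDICT (by name: the statement is the Claim_ definition above) =====
theorem filter_code_spec : Claim_equal_filter_code := by
  intro code valid_tokens _
  unfold Spec_filter_code filter_code filter_code_alt
  rw [PySem.List.foldl_append_singleton_eq_map]
  simp only [List.nil_append]
  congr 1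
  congr 1
  exact List.map_congr_left (fun l _ => pvLine_eq valid_tokens l)
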